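-- pv_equiv track=rewrite | github.com/ufal/flexiconv | flexiconv/io/tbt.py | _morph_boundaries_within_span
-- ===== SOURCE A (Python) =====
-- from typing import Any, Dict, List, Optional, Tuple
--
-- def _morph_boundaries_within_span(text: str, start: int, end: int) -> List[Tuple[int, int]]:
--     """Within text[start:end], split on spaces; return [(start+o1, start+o2), ...] in string indices."""
--     segment = text[start:end].rstrip()
--     if not segment:
--         return [(start, end)] if start < end else []
--     spans: List[Tuple[int, int]] = []
--     pos = 0
--     for i, c in enumerate(segment):
--         if c == " ":
--             if pos < i:
--                 spans.append((start + pos, start + i))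
--             pos = i + 1
--     if pos <= len(segment):
--         spans.append((start + pos, start + len(segment)))
--     return spans
-- ===== SOURCE B (Python) =====
-- from typing import List, Tuple
--
-- def _morph_boundaries_within_span(text: str, start: int, end: int) -> List[Tuple[int, int]]:
--     """Within text[start:end], split on spaces; return [(start+o1, start+o2), ...] in string indices."""
--     segment = text[start:end].rstrip()
--     if not segment:
--         return [(start, end)] if start < end else []
--     cuts = [-1] + [i for i, c in enumerate(segment) if c == " "] + [len(segment)]
--     return [(start + a + 1, start + b) for a, b in zip(cuts, cuts[1:]) if a + 1 < b]
-- ===== Notes on version B (the rewrite author's own statement) =====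
-- stated objective: alternative
-- what changed: B builds the list of space positions bracketed by sentinel cuts (-1 and len) and pairs adjacent cuts with zip, instead of A's stateful per-character scan carrying a last-space position.
import Mathlib
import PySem

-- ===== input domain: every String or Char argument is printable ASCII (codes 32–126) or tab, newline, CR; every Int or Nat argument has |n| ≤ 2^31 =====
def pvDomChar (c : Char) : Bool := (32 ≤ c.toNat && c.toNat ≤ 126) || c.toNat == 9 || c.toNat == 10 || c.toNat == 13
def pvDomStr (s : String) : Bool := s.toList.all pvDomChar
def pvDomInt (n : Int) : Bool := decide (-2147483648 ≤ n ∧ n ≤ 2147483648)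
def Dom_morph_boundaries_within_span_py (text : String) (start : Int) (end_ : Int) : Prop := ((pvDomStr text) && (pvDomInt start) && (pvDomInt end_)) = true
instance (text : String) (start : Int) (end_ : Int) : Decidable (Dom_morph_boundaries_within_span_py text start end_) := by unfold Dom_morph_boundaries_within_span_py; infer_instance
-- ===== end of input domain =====

-- B collects the space positions into a sentinel-bracketed cut list and pairs adjacent cuts with zip, instead of A's stateful per-character scan; alternative decomposition, same cost.


-- ===== PORT A =====
-- segment = text[start:end].rstrip(); char loop with (spans, pos) state; trailing append.
def morph_boundaries_within_span_py (text : String) (start : Int) (end_ : Int) : List (Int × Int) :=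
  let segment := PySem.Chars.rstrip (PySem.List.slice text.toList (some start) (some end_))
  if segment = [] then
    (if start < end_ then [(start, end_)] else [])
  else
    let r := (PySem.List.enumerate segment 0).foldl
      (fun (st : List (Int × Int) × Int) (ic : Int × Char) =>
        if ic.2 = ' ' then
          ((if st.2 < ic.1 then st.1 ++ [(start + st.2, start + ic.1)] else st.1), ic.1 + 1)
        else st) ([], 0)
    if r.2 ≤ (segment.length : Int) then r.1 ++ [(start + r.2, start + (segment.length : Int))] else r.1

-- ===== PORT B =====
-- same prelude; then cuts = [-1] + (space positions) + [len(segment)], and adjacent cut pairs via zip.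
def morph_boundaries_within_span_py_alt (text : String) (start : Int) (end_ : Int) : List (Int × Int) :=
  let segment := PySem.Chars.rstrip (PySem.List.slice text.toList (some start) (some end_))
  if segment = [] then
    (if start < end_ then [(start, end_)] else [])
  else
    let cuts : List Int :=
      [-1] ++ ((PySem.List.enumerate segment 0).filterMap
        (fun ic => if ic.2 = ' ' then some ic.1 else none)) ++ [(segment.length : Int)]
    (cuts.zip (PySem.List.slice cuts (some 1) none)).filterMap
      (fun ab => if ab.1 + 1 < ab.2 then some (start + ab.1 + 1, start + ab.2) else none)

-- ===== PRECONDITION & SPEC =====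
def Spec_morph_boundaries_within_span_py (text : String) (start : Int) (end_ : Int) (out : List (Int × Int)) : Prop := out = morph_boundaries_within_span_py_alt text start end_
instance (text : String) (start : Int) (end_ : Int) (out : List (Int × Int)) : Decidable (Spec_morph_boundaries_within_span_py text start end_ out) := by unfold Spec_morph_boundaries_within_span_py; infer_instance

-- ===== CLAIM (what is proved, stated in full; the proofs are below) =====
def Claim_equal_morph_boundaries_within_span_py : Prop := ∀ (text : String) (start : Int) (end_ : Int), Dom_morph_boundaries_within_span_py text start end_ → Spec_morph_boundaries_within_span_py text start end_ (morph_boundaries_within_span_py text start end_)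

-- ===== LEMMAS AND PROOFS =====

-- indices (from i) of the spaces in cs — proof-side model of B's comprehension
def spacesIdx : List Char → Int → List Int
  | [], _ => []
  | c :: rest, i => if c = ' ' then i :: spacesIdx rest (i+1) else spacesIdx rest (i+1)

-- A-style span recursion: pending token start p, current index i; always emit the final pending span
def tokA (start : Int) : List Char → Int → Int → List (Int × Int)
  | [], p, i => [(start + p, start + i)]
  | c :: rest, p, i =>
    if c = ' ' then (if p < i then [(start + p, start + i)] else []) ++ tokA start rest (i+1) (i+1)
    else tokA start rest p (i+1)

-- B-style: emit the final pending span only if nonempty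
def tokB (start : Int) : List Char → Int → Int → List (Int × Int)
  | [], p, i => if p < i then [(start + p, start + i)] else []
  | c :: rest, p, i =>
    if c = ' ' then (if p < i then [(start + p, start + i)] else []) ++ tokB start rest (i+1) (i+1)
    else tokB start rest p (i+1)

lemma spaces_eq (cs : List Char) : ∀ (i : Int),
    (PySem.List.enumerate cs i).filterMap (fun ic => if ic.2 = ' ' then some ic.1 else none)
      = spacesIdx cs i := by
  induction cs with
  | nil => intro i; simp [PySem.List.enumerate, spacesIdx]
  | cons c rest ih =>
    intro i
    rw [PySem.List.enumerate_cons]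
    by_cases hc : c = ' ' <;> simp [spacesIdx, hc, ih]

lemma pair_eq (start : Int) (cs : List Char) : ∀ (p i : Int),
    (((p - 1) :: (spacesIdx cs i ++ [i + (cs.length : Int)])).zip
        (spacesIdx cs i ++ [i + (cs.length : Int)])).filterMap
      (fun ab => if ab.1 + 1 < ab.2 then some (start + ab.1 + 1, start + ab.2) else none)
    = tokB start cs p i := by
  induction cs with
  | nil =>
    intro p i
    simp only [spacesIdx, List.length_nil, Nat.cast_zero, add_zero, List.nil_append,
      List.zip_cons_cons, List.zip_nil_right, List.filterMap_cons, List.filterMap_nil]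
    have e1 : p - 1 + 1 = p := by ring
    have e2 : start + (p - 1) + 1 = start + p := by ring
    rw [e1, e2]
    by_cases hp : p < i <;> simp [tokB, hp]
  | cons c rest ih =>
    intro p i
    have hlen : i + (((c :: rest).length : Nat) : Int) = (i + 1) + (rest.length : Int) := by
      simp; ring
    rw [hlen]
    by_cases hc : c = ' '
    · subst hc
      have hIH := ih (i + 1) (i + 1)
      have e0 : (i + 1) - 1 = i := by ring
      rw [e0] at hIH
      have e2 : start + (p - 1) + 1 = start + p := by ring
      by_cases hp : p < i <;>
        simp [spacesIdx, tokB, hp, e2, hIH]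
    · simp only [spacesIdx, hc, if_false]
      rw [ih p (i + 1)]
      simp [tokB, hc]

-- A's fold produces tokA (from the previous analysis of A's loop)
lemma aloop (start : Int) (cs : List Char) : ∀ (i p : Int) (spans : List (Int × Int)), p ≤ i →
    (let r := (PySem.List.enumerate cs i).foldl
      (fun (st : List (Int × Int) × Int) (ic : Int × Char) =>
        if ic.2 = ' ' then
          ((if st.2 < ic.1 then st.1 ++ [(start + st.2, start + ic.1)] else st.1), ic.1 + 1)
        else st) (spans, p)
     if r.2 ≤ i + (cs.length : Int) then r.1 ++ [(start + r.2, start + (i + (cs.length : Int)))] else r.1)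
    = spans ++ tokA start cs p i := by
  induction cs with
  | nil =>
    intro i p spans hpi
    simp [PySem.List.enumerate, tokA, hpi]
  | cons c rest ih =>
    intro i p spans hpi
    rw [PySem.List.enumerate_cons]
    simp only [List.foldl_cons]
    by_cases hc : c = ' '
    · simp only [hc, if_true, tokA]
      by_cases hlt : p < i
      · simp only [hlt, if_true]
        have := ih (i+1) (i+1) (spans ++ [(start + p, start + i)]) (le_refl _)
        simp only [List.length_cons]
        rw [show i + (((rest.length + 1 : Nat)) : Int) = (i+1) + (rest.length : Int) by push_cast; ring]
        rw [this]
        simp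
      · simp only [hlt, if_false]
        have := ih (i+1) (i+1) spans (le_refl _)
        simp only [List.length_cons]
        rw [show i + (((rest.length + 1 : Nat)) : Int) = (i+1) + (rest.length : Int) by push_cast; ring]
        rw [this]
        simp
    · simp only [hc, if_false, tokA]
      have := ih (i+1) p spans (by omega)
      simp only [List.length_cons]
      rw [show i + (((rest.length + 1 : Nat)) : Int) = (i+1) + (rest.length : Int) by push_cast; ring]
      exact this

lemma tokAB (start : Int) (cs : List Char) : ∀ (p i : Int), p ≤ i → (cs = [] → p < i) →
    cs.getLast? ≠ some ' ' → tokA start cs p i = tokB start cs p i := by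
  induction cs with
  | nil =>
    intro p i _ hne _
    simp [tokA, tokB, hne rfl]
  | cons c rest ih =>
    intro p i hpi _ hlast
    by_cases hc : c = ' '
    · subst hc
      have hr : rest ≠ [] := by
        intro h; subst h; simp at hlast
      have hlast' : rest.getLast? ≠ some ' ' := by
        cases rest with
        | nil => exact absurd rfl hr
        | cons d l => simpa [List.getLast?_cons_cons] using hlast
      simp only [tokA, tokB, if_true]
      rw [ih (i+1) (i+1) (le_refl _) (fun h => absurd h hr) hlast']
    · have h2 : rest = [] → p < i + 1 := fun _ => by omega
      have hlast' : rest = [] ∨ rest.getLast? ≠ some ' ' := by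
        cases rest with
        | nil => exact Or.inl rfl
        | cons d l => exact Or.inr (by simpa [List.getLast?_cons_cons] using hlast)
      simp only [tokA, tokB, hc, if_false]
      cases hlast' with
      | inl h => subst h; simp [tokA, tokB, h2 rfl]
      | inr h => exact ih p (i+1) (by omega) h2 h

lemma rstrip_getLast (s : List Char) :
    PySem.Chars.rstrip s ≠ [] → (PySem.Chars.rstrip s).getLast? ≠ some ' ' := by
  intro hne hlast
  unfold PySem.Chars.rstrip at hne hlast
  rw [List.getLast?_reverse] at hlast
  have hd : (List.dropWhile PySem.Chars.isspace s.reverse) ≠ [] := by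
    intro h; rw [h] at hne; simp at hne
  have := List.head?_dropWhile_not PySem.Chars.isspace s.reverse
  rw [List.head?_eq_some_head hd] at hlast
  rw [List.head?_eq_some_head hd] at this
  have hsp : PySem.Chars.isspace ((List.dropWhile PySem.Chars.isspace s.reverse).head hd) = false := by
    simpa using this
  rw [Option.some_inj.mp hlast] at hsp
  exact absurd hsp (by decide)

-- ===== VERDICT (by name: the statement is the Claim_ definition above) =====
theorem morph_boundaries_within_span_py_spec : Claim_equal_morph_boundaries_within_span_py := by
  intro text start end_ _
  unfold Spec_morph_boundaries_within_span_py
  unfold morph_boundaries_within_span_py morph_boundaries_within_span_py_alt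
  set segment := PySem.Chars.rstrip (PySem.List.slice text.toList (some start) (some end_)) with hseg
  by_cases h : segment = []
  · simp [h]
  · simp only [h, if_false]
    -- B side: cuts list → tokB
    rw [PySem.List.slice_from_one, spaces_eq]
    simp only [List.cons_append, List.nil_append, List.tail_cons]
    have hb := pair_eq start segment 0 0
    simp only [zero_sub, zero_add] at hb
    rw [hb]
    -- A side: fold → tokA
    have ha := aloop start segment 0 0 [] (le_refl _)
    simp only [zero_add, List.nil_append] at ha
    rw [ha]
    exact tokAB start segment 0 0 (le_refl _) (fun hh => absurd hh h)
      (rstrip_getLast _ (by rw [← hseg]; exact h))
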